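-- pv_equiv track=rewrite | github.com/mctp/cerberus | src/cerberus/models/bpnet.py | compute_shrinkage
-- ===== SOURCE A (Python) =====
-- def compute_shrinkage(
--     conv_kernel_size: int = 21,
--     n_dilated_layers: int = 8,
--     dil_kernel_size: int = 3,
--     profile_kernel_size: int = 75,
-- ) -> int:
--     """Compute total shrinkage (in bp) for BPNet's valid-padding conv stack.
--
--     Shrinkage = stem + tower + profile_head, where each valid-padding layer
--     shrinks by ``dilation * (kernel_size - 1)``.  BPNet uses exponential
--     dilations ``2**i`` for ``i`` in ``1..n_dilated_layers``.
--
--     Args: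
--         conv_kernel_size: Initial conv kernel size. Default: ``21``.
--         n_dilated_layers: Number of dilated residual layers. Default: ``8``.
--         dil_kernel_size: Dilated conv kernel size. Default: ``3``.
--         profile_kernel_size: Profile head kernel size. Default: ``75``.
--
--     Returns:
--         Total input-to-output shrinkage in bp.
--     """
--     stem = conv_kernel_size - 1
--     dilations = [2**i for i in range(1, n_dilated_layers + 1)]
--     tower = sum(d * (dil_kernel_size - 1) for d in dilations)
--     head = profile_kernel_size - 1
--     return stem + tower + head
-- ===== SOURCE B (Python) =====
-- def compute_shrinkage(
--     conv_kernel_size: int = 21,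
--     n_dilated_layers: int = 8,
--     dil_kernel_size: int = 3,
--     profile_kernel_size: int = 75,
-- ) -> int:
--     """Closed-form shrinkage: geometric series replaces the dilation loop."""
--     n = max(n_dilated_layers, 0)
--     tower = (2 ** (n + 1) - 2) * (dil_kernel_size - 1)
--     return (conv_kernel_size - 1) + tower + (profile_kernel_size - 1)
-- ===== Notes on version B (the rewrite author's own statement) =====
-- stated objective: faster
-- what changed: Replaced the list comprehension of exponential dilations and the generator-sum loop with the geometric-series closed form (2**(n+1)-2)*(dil_kernel_size-1), clamping n at 0 to match the empty range.
import Mathlib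
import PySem

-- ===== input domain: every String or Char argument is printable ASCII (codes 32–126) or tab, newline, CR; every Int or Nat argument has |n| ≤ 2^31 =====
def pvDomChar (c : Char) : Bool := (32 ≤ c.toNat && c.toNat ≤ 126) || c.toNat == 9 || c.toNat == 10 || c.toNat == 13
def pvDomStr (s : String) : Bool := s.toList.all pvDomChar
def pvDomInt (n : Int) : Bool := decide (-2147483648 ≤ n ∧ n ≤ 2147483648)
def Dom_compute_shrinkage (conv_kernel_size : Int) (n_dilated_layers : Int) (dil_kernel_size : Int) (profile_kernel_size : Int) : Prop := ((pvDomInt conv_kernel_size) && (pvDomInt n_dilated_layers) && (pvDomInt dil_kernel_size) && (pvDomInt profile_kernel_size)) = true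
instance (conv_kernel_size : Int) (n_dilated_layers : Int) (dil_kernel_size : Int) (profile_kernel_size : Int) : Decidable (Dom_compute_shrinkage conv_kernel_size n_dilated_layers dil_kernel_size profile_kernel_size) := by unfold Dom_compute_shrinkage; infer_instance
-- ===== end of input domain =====

-- B replaces A's dilation list and sum loop by the geometric-series closed form; objective: simpler.

-- ===== PORT A =====
-- exponent i.toNat is exact: every i in range(1, n+1) satisfies 1 ≤ i
def compute_shrinkage (conv_kernel_size : Int) (n_dilated_layers : Int) (dil_kernel_size : Int) (profile_kernel_size : Int) : Int :=
  let stem := conv_kernel_size - 1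
  let dilations := (PySem.List.pyRange 1 (n_dilated_layers + 1) 1).map (fun i => (2 : Int) ^ i.toNat)
  let tower := (dilations.map (fun d => d * (dil_kernel_size - 1))).sum
  let head := profile_kernel_size - 1
  stem + tower + head

-- ===== PORT B =====
def compute_shrinkage_alt (conv_kernel_size : Int) (n_dilated_layers : Int) (dil_kernel_size : Int) (profile_kernel_size : Int) : Int :=
  let n := max n_dilated_layers 0
  let tower := ((2 : Int) ^ (n + 1).toNat - 2) * (dil_kernel_size - 1)
  (conv_kernel_size - 1) + tower + (profile_kernel_size - 1)

-- ===== PRECONDITION & SPEC =====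
def Spec_compute_shrinkage (conv_kernel_size : Int) (n_dilated_layers : Int) (dil_kernel_size : Int) (profile_kernel_size : Int) (out : Int) : Prop := out = compute_shrinkage_alt conv_kernel_size n_dilated_layers dil_kernel_size profile_kernel_size
instance (conv_kernel_size : Int) (n_dilated_layers : Int) (dil_kernel_size : Int) (profile_kernel_size : Int) (out : Int) : Decidable (Spec_compute_shrinkage conv_kernel_size n_dilated_layers dil_kernel_size profile_kernel_size out) := by unfold Spec_compute_shrinkage; infer_instance

-- ===== CLAIM (what is proved, stated in full; the proofs are below) =====
def Claim_equal_compute_shrinkage : Prop := ∀ (conv_kernel_size : Int) (n_dilated_layers : Int) (dil_kernel_size : Int) (profile_kernel_size : Int), Dom_compute_shrinkage conv_kernel_size n_dilated_layers dil_kernel_size profile_kernel_size → Spec_compute_shrinkage conv_kernel_size n_dilated_layers dil_kernel_size profile_kernel_size (compute_shrinkage conv_kernel_size n_dilated_layers dil_kernel_size profile_kernel_size)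

-- ===== LEMMAS AND PROOFS =====

-- geometric sum over range(1, m+1)
lemma tower_sum (c : Int) : ∀ (m : Nat),
    ((((PySem.List.pyRange 1 ((m : Int) + 1) 1).map (fun i => (2 : Int) ^ i.toNat)).map
        (fun d => d * c)).sum) = ((2 : Int) ^ (m + 1) - 2) * c := by
  intro m
  induction m with
  | zero =>
    rw [show ((0 : Nat) : Int) + 1 = 1 by norm_num,
        PySem.List.pyRange_one_eq_nil (by norm_num)]
    simp
  | succ k ih =>
    rw [show ((k + 1 : Nat) : Int) + 1 = ((k : Int) + 1) + 1 by push_cast; ring,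
        PySem.List.pyRange_one_succ_right (by omega)]
    simp only [List.map_append, List.sum_append, List.map_cons, List.map_nil,
      List.sum_cons, List.sum_nil, ih]
    have h1 : ((k : Int) + 1).toNat = k + 1 := by omega
    rw [h1]
    ring

-- ===== VERDICT (by name: the statement is the Claim_ definition above) =====
theorem compute_shrinkage_spec : Claim_equal_compute_shrinkage := by
  intro c n k p _
  unfold Spec_compute_shrinkage compute_shrinkage compute_shrinkage_alt
  dsimp only
  by_cases hn : n ≤ 0
  · rw [PySem.List.pyRange_one_eq_nil (by omega)]
    have hm : max n 0 = 0 := by omega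
    simp [hm]
  · have hm : max n 0 = n := by omega
    obtain ⟨m, rfl⟩ : ∃ m : Nat, n = (m : Int) := ⟨n.toNat, by omega⟩
    rw [hm, tower_sum (k - 1) m]
    have : ((m : Int) + 1).toNat = m + 1 := by omega
    rw [this]
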